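-- pv_equiv track=rewrite | github.com/tomjrwilliams/ceg | src/ceg/app/page.py | kwargs_ready
-- ===== SOURCE A (Python) =====
-- from typing import cast, Iterable, Callable, get_type_hints, get_args, get_origin, Type, NamedTuple, Union, Optional
--
-- def kwargs_ready(
--     vs: list[str | None]
-- ) -> tuple[bool, list[str]]:
--     try:
--         end = vs.index(".")
--         return True, cast(list[str], vs[:end])
--     except:
--         if all([v is not None for v in vs]):
--             return True, cast(list[str], vs)
--         return False, []
-- ===== SOURCE B (Python) =====
-- def kwargs_ready(vs):
--     any_none = False
--     for i, v in enumerate(vs):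
--         if v == ".":
--             return True, vs[:i]
--         if v is None:
--             any_none = True
--     if any_none:
--         return False, []
--     return True, vs
-- ===== Notes on version B (the rewrite author's own statement) =====
-- stated objective: simpler
-- what changed: Replaces A's try/except around list.index plus a separate all() scan by one explicit loop that returns the prefix on '.' and OR-tracks whether any None was seen.
-- outside the precondition, e.g. on kwargs_ready([None, '.']): A returns (True, [None]), B returns (True, [None])
import Mathlib
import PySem

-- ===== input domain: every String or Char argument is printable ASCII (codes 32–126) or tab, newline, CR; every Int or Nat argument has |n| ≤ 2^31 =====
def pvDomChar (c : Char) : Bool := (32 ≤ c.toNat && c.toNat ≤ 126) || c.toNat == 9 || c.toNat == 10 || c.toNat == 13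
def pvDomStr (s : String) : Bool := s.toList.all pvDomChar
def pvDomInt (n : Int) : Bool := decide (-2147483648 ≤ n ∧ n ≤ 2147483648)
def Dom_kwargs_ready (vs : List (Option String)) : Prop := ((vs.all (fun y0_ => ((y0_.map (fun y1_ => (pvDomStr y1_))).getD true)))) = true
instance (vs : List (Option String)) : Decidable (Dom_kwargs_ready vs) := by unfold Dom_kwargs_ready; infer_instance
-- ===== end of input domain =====

-- B replaces A's try/except around list.index plus a separate all() scan by one
-- explicit loop that returns the prefix at '.' and OR-tracks any None (objective: simpler).

-- ===== PORT A =====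
-- try: end = vs.index("."); return True, vs[:end]  — the cast(list[str], ·) is ported
-- as filterMap id (exact under Pre_, which guarantees no None before the '.').
def kwargs_ready (vs : List (Option String)) : Bool × List String :=
  match PySem.List.index? vs (some ".") with
  | some e => (true, (PySem.List.slice vs none (some (e : Int))).filterMap id)
  | none =>
    if (vs.map (fun v => v.isSome)).all (fun b => b) then (true, vs.filterMap id)
    else (false, [])

-- ===== PORT B =====
-- the loop of Source B: acc is the consumed prefix (reversed), anyNone the flag;
-- vs[:i] / vs at return are acc.reverse, cast to list[str] as filterMap id (exact under Pre_)
def kwargsReadyAltGo : List (Option String) → List (Option String) → Bool → Bool × List String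
  | [], acc, anyNone =>
    if anyNone then (false, []) else (true, acc.reverse.filterMap id)
  | v :: rest, acc, anyNone =>
    if v = some "." then (true, acc.reverse.filterMap id)
    else kwargsReadyAltGo rest (v :: acc) (anyNone || v = none)

def kwargs_ready_alt (vs : List (Option String)) : Bool × List String :=
  kwargsReadyAltGo vs [] false

-- ===== PRECONDITION & SPEC =====
-- Pre_ excludes inputs with a None before the first '.': there Python A (and B) return a
-- list containing None, which is not a value of the declared return type list[str]
-- (not representable as List String in the port).
def Pre_kwargs_ready (vs : List (Option String)) : Prop :=
  none ∉ vs.take ((PySem.List.index? vs (some ".")).getD 0)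
instance (vs : List (Option String)) : Decidable (Pre_kwargs_ready vs) := by
  unfold Pre_kwargs_ready; infer_instance
def pvWitness_kwargs_ready : List (Option String) := [some "a", some ".", none]

def Spec_kwargs_ready (vs : List (Option String)) (out : Bool × List String) : Prop := out = kwargs_ready_alt vs
instance (vs : List (Option String)) (out : Bool × List String) : Decidable (Spec_kwargs_ready vs out) := by unfold Spec_kwargs_ready; infer_instance

-- ===== CLAIM (what is proved, stated in full; the proofs are below) =====
def Claim_equal_kwargs_ready : Prop := ∀ (vs : List (Option String)), Dom_kwargs_ready vs → Pre_kwargs_ready vs → Spec_kwargs_ready vs (kwargs_ready vs)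

-- ===== LEMMAS AND PROOFS =====

-- characterisation of B's loop in terms of A's two scans
lemma kwargsReadyAltGo_spec (vs acc : List (Option String)) (anyNone : Bool) :
    kwargsReadyAltGo vs acc anyNone =
      match PySem.List.index? vs (some ".") with
      | some e => (true, (acc.reverse ++ vs.take e).filterMap id)
      | none =>
        if anyNone = false ∧ vs.all (fun v => v.isSome) then
          (true, (acc.reverse ++ vs).filterMap id)
        else (false, []) := by
  induction vs generalizing acc anyNone with
  | nil =>
    simp [kwargsReadyAltGo, PySem.List.index?]
    cases anyNone <;> simp
  | cons v rest ih =>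
    by_cases hv : v = some "."
    · subst hv
      rw [kwargsReadyAltGo, if_pos rfl, PySem.List.index?_cons_self]
      simp
    · rw [kwargsReadyAltGo, if_neg hv, ih, PySem.List.index?_cons_of_ne rest hv]
      cases h : PySem.List.index? rest (some ".") with
      | some e => cases v <;> simp [List.take_succ_cons]
      | none =>
        have hvn : (v.isSome = false) ↔ v = none := by cases v <;> simp
        cases anyNone with
        | false =>
          cases hv2 : v with
          | none => simp
          | some s =>
            simp only [Bool.false_or]
            have : (some s = (none : Option String)) = False := by simp
            simp [this]
        | true => simp

lemma kwargs_ready_eq (vs : List (Option String)) :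
    kwargs_ready vs = kwargs_ready_alt vs := by
  unfold kwargs_ready kwargs_ready_alt
  rw [kwargsReadyAltGo_spec]
  cases h : PySem.List.index? vs (some ".") with
  | some e => simp [PySem.List.slice_to_natCast]
  | none =>
    simp only [List.reverse_nil, List.nil_append, true_and]
    by_cases hall : ∀ v ∈ vs, v.isSome = true <;>
      simp [List.all_eq_true, hall]

-- ===== VERDICT (by name: the statement is the Claim_ definition above) =====
theorem kwargs_ready_spec : Claim_equal_kwargs_ready := by
  intro vs _ _
  unfold Spec_kwargs_ready
  exact kwargs_ready_eq vs
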